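-- pv_equiv track=rewrite | github.com/pypi-data/pypi-mirror-384 | packages/format-docstring/format_docstring-0.1.7-py3-none-any.whl/format_docstring/docstring_rewriter.py | rebuild_literal
-- ===== SOURCE A (Python) =====
-- def rebuild_literal(original_literal: str, content: str) -> str | None:
--     """Rebuild a string literal preserving prefix and quote style.
--
--     Parameters
--     ----------
--     original_literal : str
--         The exact text of the original string literal including any prefix
--         and surrounding quotes.
--     content : str
--         The new inner content (without surrounding quotes).
--
--     Returns
--     -------
--     str or None
--         A new literal string with the same prefix and quotes and the new
--         content. Returns ``None`` if the original cannot be parsed.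
--
--     """
--     i = 0
--     n = len(original_literal)
--     while i < n and original_literal[i] in 'rRuUbBfF':
--         i += 1
--
--     prefix = original_literal[:i]
--
--     delim = ''
--     if original_literal[i : i + 3] in ('"""', "'''"):
--         delim = original_literal[i : i + 3]
--         i += 3
--     elif i < n and original_literal[i] in ('"', "'"):
--         delim = original_literal[i]
--         i += 1
--     else:
--         return None
--
--     return f'{prefix}{delim}{content}{delim}'
-- ===== SOURCE B (Python) =====
-- import re
--
-- _LITERAL_RE = re.compile(r"([rRuUbBfF]*)(\"\"\"|'''|\"|')")
--
-- def rebuild_literal(original_literal: str, content: str) -> str | None: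
--     m = _LITERAL_RE.match(original_literal)
--     if m is None:
--         return None
--     return f'{m.group(1)}{m.group(2)}{content}{m.group(2)}'
-- ===== Notes on version B (the rewrite author's own statement) =====
-- stated objective: idiomatic
-- what changed: Replaces the manual index-scanning while-loop and slice/branch logic with a single anchored regex that captures the prefix and the opening delimiter in one match.
import Mathlib
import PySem

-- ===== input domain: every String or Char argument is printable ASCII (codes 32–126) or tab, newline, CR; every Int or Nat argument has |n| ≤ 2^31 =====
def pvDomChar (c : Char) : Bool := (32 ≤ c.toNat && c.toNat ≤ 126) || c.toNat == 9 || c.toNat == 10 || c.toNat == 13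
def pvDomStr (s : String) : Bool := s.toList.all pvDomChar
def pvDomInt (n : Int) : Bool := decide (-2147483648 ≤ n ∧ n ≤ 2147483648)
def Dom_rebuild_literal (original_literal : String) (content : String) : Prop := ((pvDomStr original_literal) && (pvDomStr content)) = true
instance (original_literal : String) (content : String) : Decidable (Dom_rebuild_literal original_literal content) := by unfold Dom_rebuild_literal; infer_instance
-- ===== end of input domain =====

-- B replaces A's manual index-scanning while-loop and slice branches by one anchored regex
-- capturing prefix and opening delimiter; objective: idiomatic, same cost.

-- ===== PORT A =====
-- Characters Python's loop condition `original_literal[i] in 'rRuUbBfF'` tests against.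
def aPrefixChars : List Char := ['r', 'R', 'u', 'U', 'b', 'B', 'f', 'F']

-- the `while i < n and original_literal[i] in 'rRuUbBfF': i += 1` loop: structural
-- recursion over the remaining characters, carrying the index i (i < n ↔ suffix nonempty,
-- original_literal[i] = head of the suffix).
def aScan : List Char → Nat → Nat
  | [], i => i
  | c :: rest, i => if c ∈ aPrefixChars then aScan rest (i + 1) else i

def rebuild_literal (original_literal : String) (content : String) : Option String :=
  let s := original_literal.toList
  let i := aScan s 0
  let pfx := PySem.List.slice s none (some (i : Int))           -- original_literal[:i]
  let seg := PySem.List.slice s (some (i : Int)) (some ((i : Int) + 3))  -- original_literal[i:i+3]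
  if seg = "\"\"\"".toList ∨ seg = "'''".toList then
    some (String.ofList (pfx ++ seg ++ content.toList ++ seg))
  else
    -- `i < n and original_literal[i] in ('"', "'")`: pyGet? is none exactly when i ≥ n
    match PySem.List.pyGet? s (i : Int) with
    | some c =>
        if c = '"' ∨ c = '\'' then
          some (String.ofList (pfx ++ [c] ++ content.toList ++ [c]))
        else none
    | none => none

-- ===== PORT B =====
-- hand port of the anchored regex ([rRuUbBfF]*)("""|'''|"|') used by Source B's re.match:
-- group 1 is the greedy run of prefix characters (no delimiter char is a prefix char, so
-- backtracking can never produce a match and greedy = takeWhile; exact here), group 2 the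
-- first alternative matching right after the prefix, tried in the regex's written order.
def bIsPrefixChar (c : Char) : Bool := c ∈ (['r', 'R', 'u', 'U', 'b', 'B', 'f', 'F'] : List Char)

def rebuild_literal_alt (original_literal : String) (content : String) : Option String :=
  let cs := original_literal.toList
  let g1 := cs.takeWhile bIsPrefixChar
  let rest := cs.dropWhile bIsPrefixChar
  let build := fun (g2 : List Char) => some (String.ofList (g1 ++ g2 ++ content.toList ++ g2))
  if PySem.Chars.startswith rest "\"\"\"".toList then build "\"\"\"".toList
  else if PySem.Chars.startswith rest "'''".toList then build "'''".toList
  else if PySem.Chars.startswith rest "\"".toList then build "\"".toList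
  else if PySem.Chars.startswith rest "'".toList then build "'".toList
  else none

-- ===== PRECONDITION & SPEC =====
def Spec_rebuild_literal (original_literal : String) (content : String) (out : Option String) : Prop := out = rebuild_literal_alt original_literal content
instance (original_literal : String) (content : String) (out : Option String) : Decidable (Spec_rebuild_literal original_literal content out) := by unfold Spec_rebuild_literal; infer_instance

-- ===== CLAIM (what is proved, stated in full; the proofs are below) =====
def Claim_equal_rebuild_literal : Prop := ∀ (original_literal : String) (content : String), Dom_rebuild_literal original_literal content → Spec_rebuild_literal original_literal content (rebuild_literal original_literal content)

-- ===== LEMMAS AND PROOFS =====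

theorem aScan_eq_takeWhile (l : List Char) (i : Nat) :
    aScan l i = i + (l.takeWhile bIsPrefixChar).length := by
  induction l generalizing i with
  | nil => simp [aScan]
  | cons c rest ih =>
      by_cases h : c ∈ aPrefixChars
      · have hb : bIsPrefixChar c = true := by
          simpa [bIsPrefixChar, aPrefixChars] using h
        simp [aScan, h, List.takeWhile, hb, ih]
        omega
      · have hb : bIsPrefixChar c = false := by
          simpa [bIsPrefixChar, aPrefixChars] using h
        simp [aScan, h, List.takeWhile, hb]

theorem drop_len_takeWhile (l : List Char) :
    l.drop (l.takeWhile bIsPrefixChar).length = l.dropWhile bIsPrefixChar := by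
  induction l with
  | nil => simp
  | cons c rest ih =>
      by_cases hb : bIsPrefixChar c
      · simp [List.takeWhile, List.dropWhile, hb, ih]
      · simp [List.takeWhile, List.dropWhile, hb]

-- ===== VERDICT (by name: the statement is the Claim_ definition above) =====
theorem rebuild_literal_spec : Claim_equal_rebuild_literal := by
  intro o c _
  unfold Spec_rebuild_literal rebuild_literal rebuild_literal_alt
  simp only []
  set l := o.toList with hl
  have hscan : aScan l 0 = (l.takeWhile bIsPrefixChar).length := by
    simpa using aScan_eq_takeWhile l 0
  rw [hscan]
  have hpfx : PySem.List.slice l none (some ((l.takeWhile bIsPrefixChar).length : Int))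
      = l.takeWhile bIsPrefixChar := by
    rw [PySem.List.slice_to_natCast]
    exact (List.prefix_iff_eq_take.mp (List.takeWhile_prefix _)).symm
  have hseg : PySem.List.slice l (some ((l.takeWhile bIsPrefixChar).length : Int))
      (some (((l.takeWhile bIsPrefixChar).length : Int) + 3))
      = (l.dropWhile bIsPrefixChar).take 3 := by
    have h := PySem.List.slice_natCast_add (xs := l) (j := (l.takeWhile bIsPrefixChar).length) (n := 3)
    rw [drop_len_takeWhile] at h
    exact_mod_cast h
  have hget : PySem.List.pyGet? l ((l.takeWhile bIsPrefixChar).length : Int)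
      = (l.dropWhile bIsPrefixChar).head? := by
    rw [PySem.List.pyGet?_natCast, ← drop_len_takeWhile, List.head?_drop]
  rw [hpfx, hseg, hget]
  set r := l.dropWhile bIsPrefixChar with hr
  -- case split on r's first (up to three) characters
  match r with
  | [] => simp [PySem.Chars.startswith]
  | [a] =>
      by_cases h1 : a = '"'
      · subst h1; simp [PySem.Chars.startswith]
      · by_cases h2 : a = '\''
        · subst h2; simp [PySem.Chars.startswith]
        · have h1' : ¬('"' = a) := fun h => h1 h.symm
          have h2' : ¬('\'' = a) := fun h => h2 h.symm
          simp [PySem.Chars.startswith, h1, h2, h1', h2']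
  | [a, b] =>
      by_cases h1 : a = '"'
      · subst h1; simp [PySem.Chars.startswith]
      · by_cases h2 : a = '\''
        · subst h2; simp [PySem.Chars.startswith]
        · have h1' : ¬('"' = a) := fun h => h1 h.symm
          have h2' : ¬('\'' = a) := fun h => h2 h.symm
          simp [PySem.Chars.startswith, h1, h2, h1', h2']
  | a :: b :: d :: rest =>
      by_cases h3 : a = '"' ∧ b = '"' ∧ d = '"'
      · obtain ⟨ha, hb, hd⟩ := h3; subst ha; subst hb; subst hd
        simp [PySem.Chars.startswith]
      · by_cases h4 : a = '\'' ∧ b = '\'' ∧ d = '\''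
        · obtain ⟨ha, hb, hd⟩ := h4; subst ha; subst hb; subst hd
          simp [PySem.Chars.startswith]
        · by_cases h1 : a = '"'
          · subst h1
            have hbd : ¬(b = '"' ∧ d = '"') := fun h => h3 ⟨rfl, h.1, h.2⟩
            simp [PySem.Chars.startswith, hbd]
            intro hb hd
            exact absurd ⟨hb.symm, hd.symm⟩ hbd
          · by_cases h2 : a = '\''
            · subst h2
              have hbd : ¬(b = '\'' ∧ d = '\'') := fun h => h4 ⟨rfl, h.1, h.2⟩
              simp [PySem.Chars.startswith, hbd, h1]
              intro hb hd
              exact absurd ⟨hb.symm, hd.symm⟩ hbd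
            · have h1' : ¬('"' = a) := fun h => h1 h.symm
              have h2' : ¬('\'' = a) := fun h => h2 h.symm
              simp [PySem.Chars.startswith, h1, h2, h1', h2']
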